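-- pv_equiv track=rewrite | github.com/ekowidianto/AOC-2022 | Day 6/day_6_2.py | find_last_unique_char_index
-- ===== SOURCE A (Python) =====
-- def find_last_unique_char_index(chars):
--     unique_chars_dict = {}
--     index = 0
--     for idx, char in enumerate(chars):
--         if char in unique_chars_dict:
--             index = unique_chars_dict[char] + 1
--         unique_chars_dict[char] = idx
--
--     return index
-- ===== SOURCE B (Python) =====
-- def find_last_unique_char_index(chars):
--     cs = list(chars)
--     for i in range(len(cs) - 1, 0, -1):
--         c = cs[i]
--         for j in range(i - 1, -1, -1):
--             if cs[j] == c: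
--                 return j + 1
--     return 0
-- ===== Notes on version B (the rewrite author's own statement) =====
-- stated objective: alternative
-- what changed: Replaces A's forward pass that maintains a last-occurrence dict and an accumulating index with two nested backward scans that early-return (j+1) at the most recent prior occurrence of the last repeated character.
import Mathlib
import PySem

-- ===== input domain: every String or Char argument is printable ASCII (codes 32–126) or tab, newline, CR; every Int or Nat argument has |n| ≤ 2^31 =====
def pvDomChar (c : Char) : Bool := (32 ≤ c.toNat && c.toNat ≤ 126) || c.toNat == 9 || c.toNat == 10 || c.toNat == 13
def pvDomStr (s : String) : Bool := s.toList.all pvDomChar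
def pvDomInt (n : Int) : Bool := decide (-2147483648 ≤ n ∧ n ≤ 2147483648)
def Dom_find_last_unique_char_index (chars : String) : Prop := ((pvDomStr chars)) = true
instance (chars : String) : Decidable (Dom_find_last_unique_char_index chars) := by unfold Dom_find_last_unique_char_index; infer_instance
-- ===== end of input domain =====

-- B replaces A's forward pass with a last-occurrence dict by two nested backward scans with
-- early return (objective: alternative decomposition, same result).

-- ===== PORT A =====
-- one iteration of A's for-loop: state = (unique_chars_dict, index)
def aStep (st : PySem.Dict Char Int × Int) (p : Int × Char) : PySem.Dict Char Int × Int :=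
  match st.1.get? p.2 with
  | some v => (st.1.insert p.2 p.1, v + 1)
  | none   => (st.1.insert p.2 p.1, st.2)

def find_last_unique_char_index (chars : String) : Int :=
  ((PySem.List.enumerate chars.toList).foldl aStep (PySem.Dict.empty, 0)).2

-- ===== PORT B =====
-- inner loop: j = i-1, i-2, …, 0; return j+1 on the first cs[j] == c
def bInner (cs : List Char) (c : Char) : Nat → Option Int
  | 0 => none
  | j + 1 => if cs.getD j ' ' == c then some ((j : Int) + 1) else bInner cs c j

-- outer loop: i = n-1, n-2, …; fall through to 0 when no inner match
def bOuter (cs : List Char) : Nat → Int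
  | 0 => 0
  | i + 1 =>
    match bInner cs (cs.getD i ' ') i with
    | some v => v
    | none => bOuter cs i

def find_last_unique_char_index_alt (chars : String) : Int :=
  bOuter chars.toList chars.toList.length

-- ===== PRECONDITION & SPEC =====
def Spec_find_last_unique_char_index (chars : String) (out : Int) : Prop := out = find_last_unique_char_index_alt chars
instance (chars : String) (out : Int) : Decidable (Spec_find_last_unique_char_index chars out) := by unfold Spec_find_last_unique_char_index; infer_instance

-- ===== CLAIM (what is proved, stated in full; the proofs are below) =====
def Claim_equal_find_last_unique_char_index : Prop := ∀ (chars : String), Dom_find_last_unique_char_index chars → Spec_find_last_unique_char_index chars (find_last_unique_char_index chars)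

-- ===== LEMMAS AND PROOFS =====

def foldA (s : List Char) : PySem.Dict Char Int × Int :=
  (PySem.List.enumerate s).foldl aStep (PySem.Dict.empty, 0)

theorem foldA_snoc (s : List Char) (a : Char) :
    foldA (s ++ [a]) = aStep (foldA s) ((s.length : Int), a) := by
  simp [foldA, PySem.List.enumerate_append, PySem.List.enumerate_cons,
    PySem.List.enumerate_nil, List.foldl_append]

theorem bInner_append (cs t : List Char) (c : Char) (i : Nat) (h : i ≤ cs.length) :
    bInner (cs ++ t) c i = bInner cs c i := by
  induction i with
  | zero => rfl
  | succ j ih =>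
    have hj : j < cs.length := h
    simp [bInner, List.getD, List.getElem?_append_left hj, ih (Nat.le_of_lt hj)]

theorem bOuter_append (cs t : List Char) (i : Nat) (h : i ≤ cs.length) :
    bOuter (cs ++ t) i = bOuter cs i := by
  induction i with
  | zero => rfl
  | succ j ih =>
    have hj : j < cs.length := h
    simp only [bOuter, List.getD, List.getElem?_append_left hj,
      bInner_append cs t _ j (Nat.le_of_lt hj), ih (Nat.le_of_lt hj)]

theorem dict_eq_bInner (s : List Char) (c : Char) :
    (foldA s).1.get? c = (bInner s c s.length).map (fun w => w - 1) := by
  induction s using List.reverseRecOn with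
  | nil => simp [foldA, PySem.List.enumerate_nil, bInner]
  | append_singleton s a ih =>
    have hfst : (foldA (s ++ [a])).1 = (foldA s).1.insert a (s.length : Int) := by
      rw [foldA_snoc]; unfold aStep; cases (foldA s).1.get? a <;> rfl
    have hget : (s ++ [a]).getD s.length ' ' = a := by
      simp [List.getD]
    by_cases hc : c = a
    · subst hc
      rw [hfst, PySem.Dict.get?_insert_self]
      simp [bInner]
    · rw [hfst, PySem.Dict.get?_insert_of_ne _ _ hc]
      have : (a == c) = false := by simp [beq_eq_false_iff_ne]; exact fun h => hc h.symm
      simp only [List.length_append, List.length_cons, List.length_nil, bInner, hget, this,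
        Bool.false_eq_true, if_false]
      rw [bInner_append s [a] c s.length (Nat.le_refl _), ih]

theorem index_eq_bOuter (s : List Char) : (foldA s).2 = bOuter s s.length := by
  induction s using List.reverseRecOn with
  | nil => rfl
  | append_singleton s a ih =>
    have hget : (s ++ [a]).getD s.length ' ' = a := by simp [List.getD]
    have hlen : (s ++ [a]).length = s.length + 1 := by simp
    rw [foldA_snoc, hlen]
    unfold aStep
    simp only [bOuter, hget, bInner_append s [a] a s.length (Nat.le_refl _),
      bOuter_append s [a] s.length (Nat.le_refl _)]
    have hd := dict_eq_bInner s a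
    cases hb : bInner s a s.length with
    | none => rw [hb] at hd; simp at hd; simp [hd, ih]
    | some w =>
      rw [hb] at hd; simp at hd
      simp [hd]

-- ===== VERDICT (by name: the statement is the Claim_ definition above) =====
theorem find_last_unique_char_index_spec : Claim_equal_find_last_unique_char_index := by
  intro chars _
  show _ = _
  unfold find_last_unique_char_index find_last_unique_char_index_alt
  exact index_eq_bOuter chars.toList
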